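-- pv_equiv track=rewrite | github.com/abhishek25dh/exp-pipeline | chooser/selector_center_host_4_spans.py | partition_into_n_spans
-- ===== SOURCE A (Python) =====
-- def partition_into_n_spans(tokens, n=4, max_word=5, host_span=None):
--     # tokens is the remaining list after removing host span
--     L = len(tokens)
--     if L == 0:
--         return [(0, 0)] * n
--     # try balanced sizes
--     base = L // n
--     rem = L % n
--     sizes = [base + (1 if i < rem else 0) for i in range(n)]
--     # cap sizes to max_word; if any > max_word, leave as is but warn
--     spans = []
--     idx = 0
--     for sz in sizes:
--         end = min(idx + sz, L)
--         spans.append((idx, end))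
--         idx = end
--     # if tokens left, append to last
--     if idx < L:
--         spans[-1] = (spans[-1][0], L)
--     return spans
-- ===== SOURCE B (Python) =====
-- def partition_into_n_spans(tokens, n=4, max_word=5, host_span=None):
--     L = len(tokens)
--     if L == 0:
--         return [(0, 0)] * n
--     base, rem = divmod(L, n)
--     return [(base * i + min(i, rem), base * (i + 1) + min(i + 1, rem))
--             for i in range(n)]
-- ===== Notes on version B (the rewrite author's own statement) =====
-- stated objective: simpler
-- what changed: Replaces the sequential size list + running-index accumulator loop (with its dead min-cap and dead trailing fixup) by a single comprehension computing each span's boundaries in closed form from its index.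
import Mathlib
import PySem

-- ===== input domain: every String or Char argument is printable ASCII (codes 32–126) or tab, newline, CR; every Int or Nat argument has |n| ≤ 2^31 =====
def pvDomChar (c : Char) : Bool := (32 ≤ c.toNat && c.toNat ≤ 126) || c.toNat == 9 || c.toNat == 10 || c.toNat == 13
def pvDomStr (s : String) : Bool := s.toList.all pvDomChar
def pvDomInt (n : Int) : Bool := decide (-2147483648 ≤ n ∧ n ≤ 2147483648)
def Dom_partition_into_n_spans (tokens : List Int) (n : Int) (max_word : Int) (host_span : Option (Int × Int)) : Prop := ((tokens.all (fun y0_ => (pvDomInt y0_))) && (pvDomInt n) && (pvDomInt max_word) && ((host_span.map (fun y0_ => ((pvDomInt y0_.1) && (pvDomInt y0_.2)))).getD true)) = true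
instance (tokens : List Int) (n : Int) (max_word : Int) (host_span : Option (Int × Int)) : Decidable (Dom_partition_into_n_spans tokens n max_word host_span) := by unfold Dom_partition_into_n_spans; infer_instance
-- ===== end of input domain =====

-- B replaces A's running-index accumulator loop (with its dead min-cap and dead
-- trailing fixup) by a closed-form comprehension over the span index: simpler.

-- ===== PORT A =====
def partition_into_n_spans (tokens : List Int) (n : Int) (max_word : Int) (host_span : Option (Int × Int)) : List (Int × Int) :=
  let L : Int := tokens.length
  if L == 0 then List.replicate n.toNat (0, 0)
  else
    let base := PySem.Int.floordiv L n
    let rem := PySem.Int.mod L n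
    let sizes := (PySem.List.pyRange 0 n 1).map (fun i => base + (if i < rem then 1 else 0))
    let st := sizes.foldl (fun (st : List (Int × Int) × Int) sz =>
        (st.1 ++ [(st.2, min (st.2 + sz) L)], min (st.2 + sz) L)) ([], 0)
    if st.2 < L then
      -- spans[-1] = (spans[-1][0], L); on empty spans Python raises IndexError (outside Pre_)
      st.1.dropLast ++ [(((st.1.getLast?).getD (0, 0)).1, L)]
    else st.1

-- ===== PORT B =====
def partition_into_n_spans_alt (tokens : List Int) (n : Int) (max_word : Int) (host_span : Option (Int × Int)) : List (Int × Int) :=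
  let L : Int := tokens.length
  if L == 0 then List.replicate n.toNat (0, 0)
  else
    let base := PySem.Int.floordiv L n
    let rem := PySem.Int.mod L n
    (PySem.List.pyRange 0 n 1).map (fun i =>
      (base * i + min i rem, base * (i + 1) + min (i + 1) rem))

-- ===== PRECONDITION & SPEC =====
-- Pre_ excludes nonempty tokens with n ≤ 0: there A raises (ZeroDivisionError for
-- n == 0, IndexError from spans[-1] for n < 0).
def Pre_partition_into_n_spans (tokens : List Int) (n : Int) (max_word : Int) (host_span : Option (Int × Int)) : Prop :=
  tokens = [] ∨ 0 < n
instance (tokens : List Int) (n : Int) (max_word : Int) (host_span : Option (Int × Int)) : Decidable (Pre_partition_into_n_spans tokens n max_word host_span) := by unfold Pre_partition_into_n_spans; infer_instance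
def pvWitness_partition_into_n_spans : List Int × Int × Int × (Option (Int × Int)) := ([1, 2, 3, 4, 5], 3, 5, none)


def Spec_partition_into_n_spans (tokens : List Int) (n : Int) (max_word : Int) (host_span : Option (Int × Int)) (out : List (Int × Int)) : Prop := out = partition_into_n_spans_alt tokens n max_word host_span
instance (tokens : List Int) (n : Int) (max_word : Int) (host_span : Option (Int × Int)) (out : List (Int × Int)) : Decidable (Spec_partition_into_n_spans tokens n max_word host_span out) := by unfold Spec_partition_into_n_spans; infer_instance

-- ===== CLAIM (what is proved, stated in full; the proofs are below) =====
def Claim_equal_partition_into_n_spans : Prop := ∀ (tokens : List Int) (n : Int) (max_word : Int) (host_span : Option (Int × Int)), Dom_partition_into_n_spans tokens n max_word host_span → Pre_partition_into_n_spans tokens n max_word host_span → Spec_partition_into_n_spans tokens n max_word host_span (partition_into_n_spans tokens n max_word host_span)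

-- ===== LEMMAS AND PROOFS =====

-- The invariant of A's loop: after j steps the spans are the closed-form spans of
-- the first j indices and the running index is base*j + min j rem.
lemma pv_fold_invariant (L bse r : Int) (m : Nat)
    (hb : 0 ≤ bse) (hr : 0 ≤ r)
    (hL : L = bse * (m : Int) + r) :
    ∀ j : Nat, j ≤ m →
      (((List.range j).map (fun k : Nat => bse + (if (k : Int) < r then 1 else 0))).foldl
        (fun (st : List (Int × Int) × Int) sz =>
          (st.1 ++ [(st.2, min (st.2 + sz) L)], min (st.2 + sz) L)) ([], 0))
      = ((List.range j).map (fun k : Nat =>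
            (bse * (k : Int) + min (k : Int) r, bse * ((k : Int) + 1) + min ((k : Int) + 1) r)),
         bse * (j : Int) + min (j : Int) r) := by
  intro j hj
  induction j with
  | zero => simp; omega
  | succ i ih =>
    have hi : i ≤ m := Nat.le_of_succ_le hj
    have him : (i : Int) < (m : Int) := by exact_mod_cast hj
    rw [List.range_succ, List.map_append, List.map_append, List.foldl_append, ih hi]
    have e1 : bse * ((i : Int) + 1) = bse * (i : Int) + bse := by ring
    have e2 : bse * (m : Int) = bse * (i : Int) + bse * ((m : Int) - (i : Int)) := by ring
    have e3 : bse * 1 ≤ bse * ((m : Int) - (i : Int)) :=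
      mul_le_mul_of_nonneg_left (by omega) hb
    have hmin : min (bse * (i : Int) + min (i : Int) r +
        (bse + (if (i : Int) < r then 1 else 0))) L
        = bse * ((i : Int) + 1) + min ((i : Int) + 1) r := by
      split_ifs with h <;> omega
    simp only [List.map_cons, List.map_nil, List.foldl_cons, List.foldl_nil, hmin]
    refine Prod.ext ?_ ?_
    · rfl
    · push_cast; omega

theorem partition_into_n_spans_spec : Claim_equal_partition_into_n_spans := by
  intro tokens n max_word host_span _ hpre
  unfold Spec_partition_into_n_spans partition_into_n_spans partition_into_n_spans_alt
  rcases hpre with htok | hn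
  · subst htok; simp
  · by_cases hL0 : tokens.length = 0
    · simp [hL0]
    · have hL : (0 : Int) < (tokens.length : Int) := by
        have : 0 < tokens.length := Nat.pos_of_ne_zero hL0
        exact_mod_cast this
      simp only [beq_iff_eq, Nat.cast_eq_zero, hL0, if_false]
      set L : Int := (tokens.length : Int) with hLdef
      set bse := PySem.Int.floordiv L n with hbse
      set r := PySem.Int.mod L n with hrdef
      have hr0 : 0 ≤ r := PySem.Int.mod_nonneg _ hn
      have hrn : r < n := PySem.Int.mod_lt _ hn
      have hsum : bse * n + r = L := PySem.Int.floordiv_mul_add_mod L n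
      have hb0 : 0 ≤ bse := (PySem.Int.le_floordiv_iff_mul_le hn).mpr (by omega)
      have hmn : ((n.toNat : Int)) = n := Int.toNat_of_nonneg (le_of_lt hn)
      have hinv := pv_fold_invariant L bse r n.toNat hb0 hr0 (by rw [hmn]; omega)
          n.toNat (le_refl _)
      rw [PySem.List.pyRange_one]
      simp only [Int.sub_zero, List.map_map]
      have hfun : ((fun i => bse + (if i < r then 1 else 0)) ∘ fun k : Nat => 0 + (k : Int))
          = fun k : Nat => bse + (if (k : Int) < r then 1 else 0) := by
        funext k; simp
      rw [hfun, hinv]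
      have hidx : bse * (n.toNat : Int) + min (n.toNat : Int) r = L := by
        rw [hmn]; omega
      simp only [hidx, lt_irrefl, if_false]
      apply List.map_congr_left
      intro k _; simp
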